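-- pv_equiv track=rewrite | github.com/Dalbukerk/HTools | mod/userpass.py | scan_format
-- ===== SOURCE A (Python) =====
-- def count(word, l):
--     c = 0
--     for i in word:
--         if i == l:
--             c+=1
--     return c
--
-- def scan_format(form):
--     size_f = len(form)
--     if (size_f%2) != 0:
--         return 1
--     for i in range(0,size_f,2):
--         if form[i] != "%" or (form[i+1] not in ["l", "p", "0","m","M","d"]):
--             return 1
--     if count(form, "l") > 1:
--         return 1
--     if count(form, "p") > 1:
--         return 1
--     return 0
-- ===== SOURCE B (Python) =====
-- def scan_format(form):
--     if len(form) % 2 != 0: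
--         return 1
--     l = p = 0
--     rest = form
--     while rest:
--         head, code, rest = rest[0], rest[1], rest[2:]
--         if head != "%" or code not in "lp0mMd":
--             return 1
--         if code == "l":
--             l += 1
--         elif code == "p":
--             p += 1
--     return 1 if l > 1 or p > 1 else 0
-- ===== Notes on version B (the rewrite author's own statement) =====
-- stated objective: simpler
-- what changed: Single pass consuming the string two characters at a time while counting the two repeat-limited codes on the fly, replacing A's index-range validation loop plus two separate whole-string count scans.
import Mathlib
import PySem

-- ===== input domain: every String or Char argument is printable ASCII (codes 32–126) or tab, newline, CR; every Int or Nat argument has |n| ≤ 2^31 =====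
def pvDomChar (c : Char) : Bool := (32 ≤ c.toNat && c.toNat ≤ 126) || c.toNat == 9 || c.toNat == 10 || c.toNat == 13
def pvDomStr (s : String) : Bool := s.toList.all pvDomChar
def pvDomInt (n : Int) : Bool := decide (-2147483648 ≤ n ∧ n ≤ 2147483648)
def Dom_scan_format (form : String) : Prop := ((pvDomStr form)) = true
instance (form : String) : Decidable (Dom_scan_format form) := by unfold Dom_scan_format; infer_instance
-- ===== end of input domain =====

-- B replaces A's index-range validation loop plus two separate whole-string count scans
-- by a single pass that consumes the string two characters at a time, counting the
-- two repeat-limited codes on the fly (objective: simpler; same asymptotic cost).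


-- ===== PORT A =====
-- count(word, l): a fold over the characters with an Int accumulator, as in the Python loop.
def pvCount (word : List Char) (l : Char) : Int :=
  word.foldl (fun c i => if i == l then c + 1 else c) 0

-- A's `for i in range(0, size_f, 2)` loop with its early `return 1`, as a recursion
-- over the index list; the `none` branches (IndexError) are unreachable because the loop
-- only runs when the length is even, so both indexings are in range.
def aLoop (cs : List Char) : List Int → Bool
  | [] => false
  | i :: rest =>
    match PySem.List.pyGet? cs i with
    | none => true
    | some a =>
      if a ≠ '%' then true
      else
        match PySem.List.pyGet? cs (i + 1) with
        | none => true
        | some b =>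
          if b ∉ (['l', 'p', '0', 'm', 'M', 'd'] : List Char) then true
          else aLoop cs rest

def scan_format (form : String) : Int :=
  let size_f : Int := PySem.Str.len form
  if PySem.Int.mod size_f 2 ≠ 0 then 1
  else if aLoop form.toList (PySem.List.pyRange 0 size_f 2) then 1
  else if pvCount form.toList 'l' > 1 then 1
  else if pvCount form.toList 'p' > 1 then 1
  else 0

-- ===== PORT B =====
-- B's while loop: head, code, rest = rest[0], rest[1], rest[2:]; the singleton case is
-- unreachable because the loop only runs when the length is even.
def bLoop : List Char → Int → Int → Int
  | [], l, p => if l > 1 ∨ p > 1 then 1 else 0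
  | [_], _, _ => 1
  | head :: code :: rest, l, p =>
    if head ≠ '%' ∨ code ∉ (['l', 'p', '0', 'm', 'M', 'd'] : List Char) then 1
    else bLoop rest (if code == 'l' then l + 1 else l) (if code == 'p' then p + 1 else p)

def scan_format_alt (form : String) : Int :=
  if PySem.Int.mod (PySem.Str.len form) 2 ≠ 0 then 1
  else bLoop form.toList 0 0

-- ===== PRECONDITION & SPEC =====
def Spec_scan_format (form : String) (out : Int) : Prop := out = scan_format_alt form
instance (form : String) (out : Int) : Decidable (Spec_scan_format form out) := by unfold Spec_scan_format; infer_instance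

-- ===== CLAIM (what is proved, stated in full; the proofs are below) =====
def Claim_equal_scan_format : Prop := ∀ (form : String), Dom_scan_format form → Spec_scan_format form (scan_format form)

-- ===== LEMMAS AND PROOFS =====

lemma pvCount_foldl_init (word : List Char) (l : Char) (init : Int) :
    word.foldl (fun c i => if i == l then c + 1 else c) init = init + pvCount word l := by
  induction word generalizing init with
  | nil => simp [pvCount]
  | cons x xs ih =>
    simp only [pvCount, List.foldl_cons] at *
    rw [ih, ih (if (x == l) = true then 0 + 1 else 0)]
    split_ifs <;> ring

lemma pvCount_cons (x : Char) (xs : List Char) (l : Char) :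
    pvCount (x :: xs) l = (if x == l then 1 else 0) + pvCount xs l := by
  simp only [pvCount, List.foldl_cons]
  rw [pvCount_foldl_init]
  split_ifs <;> simp [pvCount]

lemma pyGet?_shift1 {α : Type} (x : α) (xs : List α) (i : Int) (hi : 0 ≤ i) :
    PySem.List.pyGet? (x :: xs) (i + 1) = PySem.List.pyGet? xs i := by
  obtain ⟨n, rfl⟩ := Int.eq_ofNat_of_zero_le hi
  exact PySem.List.pyGet?_cons_succ x xs n

-- shifting every index by 2 mirrors dropping the first two characters
lemma aLoop_shift2 (x y : Char) (xs : List Char) (is : List Int)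
    (h : ∀ i ∈ is, 0 ≤ i) :
    aLoop (x :: y :: xs) (is.map (· + 2)) = aLoop xs is := by
  induction is with
  | nil => simp [aLoop]
  | cons i rest ih =>
    have hi : 0 ≤ i := h i (by simp)
    have h1 : PySem.List.pyGet? (x :: y :: xs) (i + 2) = PySem.List.pyGet? xs i := by
      rw [show i + 2 = (i + 1) + 1 by ring, pyGet?_shift1 _ _ _ (by omega),
          pyGet?_shift1 _ _ _ hi]
    have h2 : PySem.List.pyGet? (x :: y :: xs) (i + 2 + 1) = PySem.List.pyGet? xs (i + 1) := by
      rw [show i + 2 + 1 = (i + 1 + 1) + 1 by ring, pyGet?_shift1 _ _ _ (by omega),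
          pyGet?_shift1 _ _ _ (by omega)]
    simp only [List.map_cons, aLoop, h1, h2]
    rw [ih (fun j hj => h j (by simp [hj]))]

lemma pyRange_two (m : Nat) :
    PySem.List.pyRange 0 (2 * (m : Int)) 2 = (List.range m).map (fun k : Nat => (2 * k : Int)) := by
  rw [PySem.List.pyRange_of_pos 0 (2 * (m : Int)) (by norm_num)]
  rcases Nat.eq_zero_or_pos m with hm | hm
  · subst hm; simp
  · rw [if_pos (by positivity)]
    rw [show ((2 * (m : Int) - 0 + 2 - 1) / 2).toNat = m by omega]
    apply List.map_congr_left
    intro k _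
    ring

lemma pyRange_two_succ (m : Nat) :
    PySem.List.pyRange 0 (2 * ((m : Int) + 1)) 2
      = 0 :: (PySem.List.pyRange 0 (2 * (m : Int)) 2).map (· + 2) := by
  rw [show (2 : Int) * ((m : Int) + 1) = 2 * (((m + 1 : Nat) : Int)) by push_cast; ring]
  rw [pyRange_two, pyRange_two, List.range_succ_eq_map]
  simp only [List.map_cons, List.map_map, Nat.cast_zero, mul_zero, List.cons.injEq]
  refine ⟨trivial, List.map_congr_left ?_⟩
  intro k _
  simp only [Function.comp_apply, Nat.succ_eq_add_one]
  push_cast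
  ring

-- the heart of the proof: A's validation-then-count equals B's single pass, with the
-- 'l'/'p' counts already accumulated into l and p
lemma key (n : Nat) : ∀ (cs : List Char), cs.length = 2 * n → ∀ (l p : Int),
    (if aLoop cs (PySem.List.pyRange 0 (cs.length : Int) 2) then (1 : Int)
     else if l + pvCount cs 'l' > 1 then 1
     else if p + pvCount cs 'p' > 1 then 1
     else 0) = bLoop cs l p := by
  induction n with
  | zero =>
    intro cs hcs l p
    have : cs = [] := List.length_eq_zero_iff.mp (by omega)
    subst this
    have h0 : PySem.List.pyRange 0 (([] : List Char).length : Int) 2 = [] := by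
      simpa using pyRange_two 0
    rw [h0]
    simp only [aLoop, pvCount, List.foldl_nil, bLoop, Bool.false_eq_true, if_false]
    split_ifs <;> simp_all <;> omega
  | succ m ih =>
    intro cs hcs l p
    match cs with
    | [] => simp at hcs
    | [x] => simp at hcs; omega
    | a :: b :: rest =>
      have hrest : rest.length = 2 * m := by simp at hcs; omega
      have hlen : (((a :: b :: rest).length : Nat) : Int) = 2 * ((m : Int) + 1) := by
        simp [hrest]; push_cast; ring
      rw [hlen, pyRange_two_succ]
      have hnonneg : ∀ i ∈ PySem.List.pyRange 0 (2 * (m : Int)) 2, 0 ≤ i := by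
        intro i hi
        rw [pyRange_two] at hi
        simp only [List.mem_map, List.mem_range] at hi
        obtain ⟨k, _, rfl⟩ := hi
        positivity
      have h0 : PySem.List.pyGet? (a :: b :: rest) 0 = some a :=
        PySem.List.pyGet?_zero_cons a _
      have h1 : PySem.List.pyGet? (a :: b :: rest) (0 + 1) = some b := by
        rw [show (0 : Int) + 1 = ((0 : Nat) : Int) + 1 by norm_num,
            PySem.List.pyGet?_cons_succ]
        simpa using PySem.List.pyGet?_zero_cons b rest
      simp only [aLoop, h0, h1, aLoop_shift2 a b rest _ hnonneg]
      by_cases ha : a = '%'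
      · by_cases hb : b ∈ (['l', 'p', '0', 'm', 'M', 'd'] : List Char)
        · -- valid pair: fold the counts into the accumulators and use the IH
          simp only [ha, hb, ne_eq, not_true_eq_false, if_false, not_false_eq_true]
          rw [pvCount_cons, pvCount_cons, pvCount_cons, pvCount_cons]
          rw [show ('%' == 'l') = false by decide, show ('%' == 'p') = false by decide]
          simp only [Bool.false_eq_true, if_false]
          have hIH := ih rest hrest (if b == 'l' then l + 1 else l)
            (if b == 'p' then p + 1 else p)
          rw [hrest] at hIH
          push_cast at hIH
          have harr : ∀ (v w : Int) (c t : Char),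
              v + (0 + ((if c == t then (1 : Int) else 0) + w))
                = (if c == t then v + 1 else v) + w := by
            intro v w c t; split_ifs <;> ring
          rw [harr l _ b 'l', harr p _ b 'p', hIH]
          have hbne : b ≠ '%' := by
            intro hbad; rw [hbad] at hb; simp at hb
          simp [bLoop, hb]
        · simp [bLoop, ha, hb]
      · simp [bLoop, ha]

-- top level: odd length on both sides, else `key` with zero accumulators
lemma scan_format_eq (form : String) : scan_format form = scan_format_alt form := by
  unfold scan_format scan_format_alt
  simp only [PySem.Int.mod_eq_emod_of_pos (show (0 : Int) < 2 by norm_num), PySem.Str.len_eq]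
  by_cases hodd : ((form.toList.length : Int)) % 2 ≠ 0
  · rw [if_pos hodd, if_pos hodd]
  · have hcond : ¬ ((form.toList.length : Int) % 2 ≠ 0) := hodd
    push_neg at hodd
    rw [if_neg hcond, if_neg hcond]
    obtain ⟨m, hm⟩ : ∃ m, form.toList.length = 2 * m := ⟨form.toList.length / 2, by omega⟩
    have hkey := key m form.toList hm 0 0
    simp only [zero_add] at hkey
    exact hkey

-- ===== VERDICT (by name: the statement is the Claim_ definition above) =====
theorem scan_format_spec : Claim_equal_scan_format := by
  intro form _
  unfold Spec_scan_format
  exact scan_format_eq form
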